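-- pv_equiv track=rewrite | github.com/gtyopal/Multioutput-multilabel-calssification-autotag | data_preprocessing.py | tag_split
-- ===== SOURCE A (Python) =====
-- def tag_split(data_list):
--     ''' add at 20180922 '''
--     res = []
--     for line in data_list:
--         try:
--             oid,tags,message = line[0],line[1],line[2]
--             tag_list = ['' for i in range(5)]
--             fields = tags.split(r"/")
--             for i in range(len(fields)):
-- #                tag_list[i] = fields[i]
--                 if i == 0:
--                     tag_list[i]=fields[i]
--                 else:
--                     tag_list[i] = '/'.join([tag_list[i-1],fields[i]])
--             line_res = [oid]
--             line_res.extend(tag_list)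
--             line_res.append(message)
--             res.append(line_res)
--         except:
--             continue
--     return res
-- ===== SOURCE B (Python) =====
-- def _row(line):
--     # None = line skipped (too short, or more than 5 tag levels)
--     if len(line) < 3:
--         return None
--     tags = line[1]
--     cuts = [i for i, ch in enumerate(tags) if ch == '/']
--     if len(cuts) > 4:
--         return None
--     return ([line[0]]
--             + [tags[:p] for p in cuts] + [tags]
--             + [''] * (4 - len(cuts))
--             + [line[2]])
--
--
-- def tag_split(data_list):
--     return [r for r in map(_row, data_list) if r is not None]
-- ===== Notes on version B (the rewrite author's own statement) =====
-- stated objective: alternative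
-- what changed: B never splits or joins: it scans the tag string once for the positions of '/' and emits the cumulative slots directly as string prefixes tags[:p] (plus the whole string), replacing A's split+incremental-join into a mutable 5-slot buffer under try/except with explicit guards and a per-line helper mapped over the input.
import Mathlib
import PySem

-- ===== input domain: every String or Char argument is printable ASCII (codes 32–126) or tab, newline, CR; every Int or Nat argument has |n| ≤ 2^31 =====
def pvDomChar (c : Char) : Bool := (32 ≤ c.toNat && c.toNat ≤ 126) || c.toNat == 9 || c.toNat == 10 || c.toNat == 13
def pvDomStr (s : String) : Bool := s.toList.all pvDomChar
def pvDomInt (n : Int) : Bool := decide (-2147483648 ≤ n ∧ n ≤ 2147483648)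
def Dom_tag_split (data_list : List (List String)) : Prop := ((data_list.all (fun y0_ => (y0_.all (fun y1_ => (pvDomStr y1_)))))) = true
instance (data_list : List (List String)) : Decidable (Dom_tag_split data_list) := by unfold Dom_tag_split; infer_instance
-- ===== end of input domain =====

-- B drops split/join entirely: it scans the tag string for the positions of '/' and emits
-- the cumulative slots directly as string prefixes tags[:p] plus the whole string, with
-- explicit guards instead of A's try/except over a mutable 5-slot buffer (objective: alternative).

-- ===== PORT A =====
-- tags.split("/") ("/" ≠ "", so split? is always `some`)
def pvSplitSlash (s : String) : List String := (PySem.Str.split? s "/").getD []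

-- one step of A's inner `for i in range(len(fields))` loop over the mutable tag_list;
-- `none` = IndexError (assignment tag_list[i] with i out of range), caught by A's bare except
def pvTagStepA (fields : List String) (acc : Option (List String)) (i : Nat) : Option (List String) :=
  match acc with
  | none => none
  | some tl =>
    if i < tl.length then
      if i = 0 then some (tl.set i (fields.getD i ""))
      else some (tl.set i (PySem.Str.join "/" [tl.getD (i-1) "", fields.getD i ""]))
    else none

-- A's body for one line (none = some statement raised; the except clause skips the line)
def pvLineA (line : List String) : Option (List String) :=
  match PySem.List.pyGet? line 0, PySem.List.pyGet? line 1, PySem.List.pyGet? line 2 with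
  | some oid, some tags, some message =>
    let fields := pvSplitSlash tags
    match (List.range fields.length).foldl (pvTagStepA fields) (some ["", "", "", "", ""]) with
    | some tl => some ([oid] ++ tl ++ [message])
    | none => none
  | _, _, _ => none

def tag_split (data_list : List (List String)) : List (List String) :=
  data_list.foldl (fun res line =>
    match pvLineA line with
    | some r => res ++ [r]
    | none => res) []

-- ===== PORT B =====
-- B's helper _row: None (skip) for short lines and for more than 4 slashes; otherwise
-- the row assembled from the '/'-positions `cuts` and string prefixes tags[:p]
def pvRow (line : List String) : Option (List String) :=
  if line.length < 3 then none
  else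
    let tags := line.getD 1 ""
    let cuts := ((PySem.List.enumerate tags.toList 0).filter (fun p => p.2 == '/')).map (·.1)
    if cuts.length > 4 then none
    else some ([line.getD 0 ""]
      ++ cuts.map (fun p => String.ofList (PySem.List.slice tags.toList none (some p)))
      ++ [tags] ++ List.replicate (4 - cuts.length) "" ++ [line.getD 2 ""])

def tag_split_alt (data_list : List (List String)) : List (List String) :=
  (data_list.map pvRow).filterMap id

-- ===== PRECONDITION & SPEC =====
def Spec_tag_split (data_list : List (List String)) (out : List (List String)) : Prop := out = tag_split_alt data_list
instance (data_list : List (List String)) (out : List (List String)) : Decidable (Spec_tag_split data_list out) := by unfold Spec_tag_split; infer_instance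

-- ===== CLAIM =====
def Claim_equal_tag_split : Prop := ∀ (data_list : List (List String)), Dom_tag_split data_list → Spec_tag_split data_list (tag_split data_list)

-- ===== LEMMAS AND PROOFS =====

-- structural form of splitting a char list on '/'
def splitC : List Char → List (List Char)
  | [] => [[]]
  | c :: t => if c = '/' then [] :: splitC t else (splitC t).modifyHead (c :: ·)

-- positions of '/' in a char list
def cutsC : List Char → List Nat
  | [] => []
  | c :: t => if c = '/' then 0 :: (cutsC t).map (· + 1) else (cutsC t).map (· + 1)

theorem splitC_ne_nil (l : List Char) : splitC l ≠ [] := by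
  cases l with
  | nil => simp [splitC]
  | cons c t =>
    simp only [splitC]
    split_ifs
    · simp
    · cases h : splitC t with
      | nil => exact absurd h (splitC_ne_nil t)
      | cons a b => simp

theorem splitOn_go_eq (l cur : List Char) (accs : List (List Char)) (fuel : Nat)
    (h : l.length ≤ fuel) :
    PySem.Chars.splitOn.go ['/'] fuel l cur accs
      = accs.reverse ++ (splitC l).modifyHead (cur.reverse ++ ·) := by
  induction l generalizing fuel cur accs with
  | nil =>
    cases fuel with
    | zero => simp [PySem.Chars.splitOn.go, splitC]
    | succ f => simp [PySem.Chars.splitOn.go, splitC]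
  | cons c t ih =>
    cases fuel with
    | zero => simp at h
    | succ f =>
      rw [PySem.Chars.splitOn.go]
      by_cases hc : c = '/'
      · subst hc
        have hpre : List.isPrefixOf ['/'] ('/' :: t) = true := by simp [List.isPrefixOf]
        simp only [hpre, if_pos]
        have hdrop : List.drop ['/'].length ('/' :: t) = t := rfl
        rw [hdrop, ih _ _ _ (by simpa using h)]
        obtain ⟨a, b, hab⟩ : ∃ a b, splitC t = a :: b := by
          cases hs : splitC t with
          | nil => exact absurd hs (splitC_ne_nil t)
          | cons a b => exact ⟨a, b, rfl⟩
        simp [splitC, hab, List.modifyHead]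
      · have hpre : List.isPrefixOf ['/'] (c :: t) = false := by
          simp [List.isPrefixOf]
          exact fun h' => absurd h'.symm hc
        simp only [hpre, Bool.false_eq_true, if_false]
        rw [ih _ _ _ (by simpa using Nat.le_of_succ_le_succ h)]
        obtain ⟨a, b, hab⟩ : ∃ a b, splitC t = a :: b := by
          cases hs : splitC t with
          | nil => exact absurd hs (splitC_ne_nil t)
          | cons a b => exact ⟨a, b, rfl⟩
        simp [splitC, hab, hc, List.modifyHead]

theorem splitOn_slash (l : List Char) : PySem.Chars.splitOn l ['/'] = splitC l := by
  unfold PySem.Chars.splitOn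
  rw [splitOn_go_eq l [] [] (l.length + 1) (by omega)]
  obtain ⟨a, b, hab⟩ : ∃ a b, splitC l = a :: b := by
    cases hs : splitC l with
    | nil => exact absurd hs (splitC_ne_nil l)
    | cons a b => exact ⟨a, b, rfl⟩
  simp [hab, List.modifyHead]

-- join peels a cons off a nonempty tail
theorem join_cons_ne (sep x : List Char) (F : List (List Char)) (hF : F ≠ []) :
    PySem.Chars.join sep (x :: F) = x ++ sep ++ PySem.Chars.join sep F := by
  cases F with
  | nil => simp at hF
  | cons a b => rw [PySem.Chars.join_cons_cons]

-- the three facts tying splitC to cutsC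
theorem factsC (l : List Char) :
    (splitC l).length = (cutsC l).length + 1
    ∧ PySem.Chars.join ['/'] (splitC l) = l
    ∧ ∀ k, k < (cutsC l).length →
        PySem.Chars.join ['/'] ((splitC l).take (k + 1)) = l.take ((cutsC l).getD k 0) := by
  induction l with
  | nil => refine ⟨by simp [splitC, cutsC], by simp [splitC, PySem.Chars.join_singleton], ?_⟩
           intro k hk; simp [cutsC] at hk
  | cons c t ih =>
    obtain ⟨ihlen, ihjoin, ihpref⟩ := ih
    obtain ⟨a, b, hab⟩ : ∃ a b, splitC t = a :: b := by
      cases hs : splitC t with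
      | nil => exact absurd hs (splitC_ne_nil t)
      | cons a b => exact ⟨a, b, rfl⟩
    by_cases hc : c = '/'
    · subst hc
      have hsplit : splitC ('/' :: t) = [] :: splitC t := by simp [splitC]
      have hcuts : cutsC ('/' :: t) = 0 :: (cutsC t).map (· + 1) := by simp [cutsC]
      refine ⟨by simp [hsplit, hcuts, ihlen], ?_, ?_⟩
      · rw [hsplit, join_cons_ne _ _ _ (splitC_ne_nil t), ihjoin]; simp
      · intro k hk
        rw [hsplit, hcuts]
        cases k with
        | zero => simp [PySem.Chars.join_singleton]
        | succ k =>
          have hk' : k < (cutsC t).length := by simpa [hcuts] using hk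
          have htk : (splitC t).take (k + 1) ≠ [] := by simp [hab]
          have hgd : ((cutsC t).map (· + 1)).getD k 0 = (cutsC t).getD k 0 + 1 := by
            rw [List.getD_eq_getElem _ _ (by simpa using hk'),
              List.getD_eq_getElem _ _ hk']
            simp
          rw [List.getD_cons_succ, hgd, List.take_succ_cons, join_cons_ne _ _ _ htk,
            ihpref k hk', List.take_succ_cons]
          simp
    · have hsplit : splitC (c :: t) = (c :: a) :: b := by simp [splitC, hc, hab, List.modifyHead]
      have hcuts : cutsC (c :: t) = (cutsC t).map (· + 1) := by simp [cutsC, hc]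
      have hjoin_mod : ∀ (F' : List (List Char)) (x : List Char),
          PySem.Chars.join ['/'] ((c :: x) :: F') = c :: PySem.Chars.join ['/'] (x :: F') := by
        intro F' x
        cases F' with
        | nil => simp [PySem.Chars.join_singleton]
        | cons u v => rw [PySem.Chars.join_cons_cons, PySem.Chars.join_cons_cons]; simp
      refine ⟨by simpa [hsplit, hcuts, hab] using ihlen, ?_, ?_⟩
      · rw [hsplit, hjoin_mod, ← hab, ihjoin]
      · intro k hk
        have hk' : k < (cutsC t).length := by simpa [hcuts] using hk
        rw [hsplit, hcuts, List.take_succ_cons, hjoin_mod]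
        have hstep : c :: PySem.Chars.join ['/'] (a :: b.take k)
            = c :: PySem.Chars.join ['/'] ((splitC t).take (k + 1)) := by
          rw [hab, List.take_succ_cons]
        rw [hstep, ihpref k hk']
        have hgd : ((cutsC t).map (· + 1)).getD k 0 = (cutsC t).getD k 0 + 1 := by
          rw [List.getD_eq_getElem _ _ (by simpa using hk'),
            List.getD_eq_getElem _ _ hk']
          simp
        rw [hgd, List.take_succ_cons]

-- B's comprehension over enumerate computes exactly the '/'-positions
theorem cuts_eq (l : List Char) (s : Int) :
    (((PySem.List.enumerate l s).filter (fun p => p.2 == '/')).map (·.1))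
      = (cutsC l).map (fun n : Nat => s + (n : Int)) := by
  induction l generalizing s with
  | nil => simp [PySem.List.enumerate_nil, cutsC]
  | cons c t ih =>
    rw [PySem.List.enumerate_cons, List.filter_cons]
    by_cases hc : c = '/'
    · subst hc
      have hif : (((s, ('/' : Char)).2) == '/') = true := rfl
      rw [hif, if_pos rfl, List.map_cons, ih (s + 1)]
      have hcu : cutsC ('/' :: t) = 0 :: (cutsC t).map (· + 1) := by simp [cutsC]
      rw [hcu, List.map_cons, List.map_map]
      refine congrArg₂ _ (by simp) ?_
      apply List.map_congr_left
      intro n _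
      simp
      ring
    · have hif : (((s, c).2) == '/') = false := by simpa using hc
      rw [hif, if_neg (by simp), ih (s + 1)]
      have hcu : cutsC (c :: t) = (cutsC t).map (· + 1) := by simp [cutsC, hc]
      rw [hcu, List.map_map]
      apply List.map_congr_left
      intro n _
      simp
      ring

-- the cumulative prefixes A's buffer holds, phrased with take
def pvPref (fields : List String) (k : Nat) : List String :=
  (List.range k).map (fun i => PySem.Str.join "/" (fields.take (i + 1)))

theorem pvPref_length (fields : List String) (k : Nat) : (pvPref fields k).length = k := by
  simp [pvPref]

-- '/'.join(l ++ [x]) peels its last element off when l is nonempty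
theorem pvChars_join_append_singleton (sep x : List Char) (l : List (List Char)) (h : l ≠ []) :
    PySem.Chars.join sep (l ++ [x]) = PySem.Chars.join sep l ++ sep ++ x := by
  induction l with
  | nil => simp at h
  | cons a t ih =>
    cases t with
    | nil => simp [PySem.Chars.join_cons_cons, PySem.Chars.join_singleton]
    | cons b t' =>
      simp only [List.cons_append]
      rw [PySem.Chars.join_cons_cons]
      have hih := ih (by simp)
      simp only [List.cons_append] at hih
      rw [hih, PySem.Chars.join_cons_cons]
      simp [List.append_assoc]

theorem pvStr_join_append_singleton (sep x : String) (l : List String) (h : l ≠ []) :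
    PySem.Str.join sep (l ++ [x]) = PySem.Str.join sep [PySem.Str.join sep l, x] := by
  unfold PySem.Str.join
  congr 1
  simp only [List.map_append, List.map_cons, List.map_nil, String.toList_ofList]
  rw [pvChars_join_append_singleton _ _ _ (by simpa using h),
    PySem.Chars.join_cons_cons, PySem.Chars.join_singleton]

-- invariant of A's inner loop: after k steps the buffer holds the first k prefixes, padded to 5
theorem pvLoopA_inv (fields : List String) (k : Nat) (hk5 : k ≤ 5) (hkf : k ≤ fields.length) :
    (List.range k).foldl (pvTagStepA fields) (some ["", "", "", "", ""])
      = some (pvPref fields k ++ List.replicate (5 - k) "") := by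
  induction k with
  | zero => simp [pvPref]
  | succ k ih =>
    rw [List.range_succ, List.foldl_append, ih (by omega) (by omega)]
    have hlen : (pvPref fields k ++ List.replicate (5 - k) "").length = 5 := by
      simp [pvPref_length]; omega
    have hklt5 : k < 5 := by omega
    have hklt : k < fields.length := by omega
    have hfne : fields ≠ [] := by rintro rfl; simp at hklt
    simp only [List.foldl_cons, List.foldl_nil, pvTagStepA, hlen]
    rw [if_pos hklt5]
    rcases Nat.eq_zero_or_pos k with hk0 | hkpos
    · subst hk0
      rw [if_pos rfl]
      obtain ⟨f0, t, rfl⟩ : ∃ f0 t, fields = f0 :: t := by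
        cases fields with
        | nil => simp at hklt
        | cons f0 t => exact ⟨f0, t, rfl⟩
      congr 1
      simp [pvPref, PySem.Str.join, PySem.Chars.join_singleton, List.replicate_succ]
    · rw [if_neg (by omega)]
      have hget : (pvPref fields k ++ List.replicate (5 - k) "").getD (k - 1) ""
          = PySem.Str.join "/" (fields.take k) := by
        rw [List.getD_append _ _ _ _ (by rw [pvPref_length]; omega)]
        unfold pvPref
        rw [List.getD_eq_getElem _ _ (by simp; omega)]
        simp
        congr 1
        congr 1
        omega
      rw [hget]
      have htk : fields.take k ≠ [] := by
        rw [Ne, List.take_eq_nil_iff]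
        rintro (h' | h')
        · omega
        · exact hfne h'
      have hjoin : PySem.Str.join "/" [PySem.Str.join "/" (fields.take k), fields.getD k ""]
          = PySem.Str.join "/" (fields.take (k + 1)) := by
        rw [← pvStr_join_append_singleton "/" (fields.getD k "") (fields.take k) htk]
        congr 1
        rw [List.getD_eq_getElem _ _ hklt, ← List.take_concat_get']
      rw [hjoin]
      congr 1
      apply List.ext_getElem
      · simp [pvPref_length]; omega
      · intro i h1 h2
        rw [List.getElem_set]
        by_cases hik : k = i
        · subst hik
          rw [if_pos rfl, List.getElem_append_left (by rw [pvPref_length]; omega)]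
          simp [pvPref]
        · rw [if_neg hik]
          by_cases hil : i < k
          · rw [List.getElem_append_left (by rw [pvPref_length]; omega),
              List.getElem_append_left (by rw [pvPref_length]; omega)]
            simp [pvPref]
          · rw [List.getElem_append_right (by rw [pvPref_length]; omega),
              List.getElem_append_right (by rw [pvPref_length]; omega)]
            simp

-- once `none`, A's inner loop stays `none`
theorem pvLoopA_none (fields : List String) (l : List Nat) :
    l.foldl (pvTagStepA fields) none = none := by
  induction l with
  | nil => rfl
  | cons a t ih => simpa [pvTagStepA] using ih

-- with more than 5 fields the inner loop raises IndexError
theorem pvLoopA_overflow (fields : List String) (h : 5 < fields.length) :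
    (List.range fields.length).foldl (pvTagStepA fields) (some ["", "", "", "", ""]) = none := by
  have hsplit : fields.length = 6 + (fields.length - 6) := by omega
  have h6 : List.range 6 = List.range 5 ++ [5] := by decide
  have hstep : pvTagStepA fields (some (pvPref fields 5 ++ List.replicate (5 - 5) "")) 5 = none := by
    unfold pvTagStepA
    simp [pvPref_length]
  rw [hsplit, List.range_add, List.foldl_append, h6, List.foldl_append,
    pvLoopA_inv fields 5 (by omega) (by omega), List.foldl_cons, hstep, List.foldl_nil]
  exact pvLoopA_none _ _

-- A's prefix list, rewritten as B computes it: string prefixes at the '/'-positions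
theorem pvPref_eq_cuts (l : List Char) :
    pvPref ((splitC l).map String.ofList) ((cutsC l).length + 1)
      = (cutsC l).map (fun p => String.ofList (l.take p)) ++ [String.ofList l] := by
  obtain ⟨hlen, hjoin, hpref⟩ := factsC l
  have hjoin_str : ∀ (k : Nat), PySem.Str.join "/" (((splitC l).map String.ofList).take (k + 1))
      = String.ofList (PySem.Chars.join ['/'] ((splitC l).take (k + 1))) := by
    intro k
    unfold PySem.Str.join
    congr 1
    rw [← List.map_take, List.map_map]
    congr 1
    simp [Function.comp_def, String.toList_ofList]
  unfold pvPref
  rw [List.range_succ, List.map_append]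
  congr 1
  · apply List.ext_getElem
    · simp
    · intro i h1 h2
      simp only [List.getElem_map, List.getElem_range]
      rw [hjoin_str, hpref i (by simpa using h2), List.getD_eq_getElem _ _ (by simpa using h2)]
  · simp only [List.map_cons, List.map_nil]
    rw [hjoin_str, List.take_of_length_le (by omega), hjoin]

-- fields, seen through splitC
theorem pvSplitSlash_eq (s : String) :
    pvSplitSlash s = (splitC s.toList).map String.ofList := by
  unfold pvSplitSlash
  rw [PySem.Str.split?]
  have : PySem.Chars.split? s.toList "/".toList = some (PySem.Chars.splitOn s.toList ['/']) := by
    rw [PySem.Chars.split?]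
    rfl
  rw [this]
  simp [splitOn_slash]

-- per-line agreement of the two ports
theorem pvLine_eq (line : List String) : pvLineA line = pvRow line := by
  match line with
  | [] => rfl
  | [a] => rfl
  | [a, b] => rfl
  | a :: b :: c :: rest =>
    have h0 : PySem.List.pyGet? (a :: b :: c :: rest) 0 = some a :=
      PySem.List.pyGet?_zero_cons _ _
    have h1 : PySem.List.pyGet? (a :: b :: c :: rest) 1 = some b := by
      rw [PySem.List.pyGet?_of_nonneg _ (by omega)]
      rfl
    have h2 : PySem.List.pyGet? (a :: b :: c :: rest) 2 = some c := by
      rw [PySem.List.pyGet?_of_nonneg _ (by omega)]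
      rfl
    unfold pvLineA pvRow
    rw [h0, h1, h2]
    dsimp only
    have hg0 : (a :: b :: c :: rest).getD 0 "" = a := rfl
    have hg1 : (a :: b :: c :: rest).getD 1 "" = b := rfl
    have hg2 : (a :: b :: c :: rest).getD 2 "" = c := rfl
    rw [if_neg (by simp)]
    rw [hg0, hg1, hg2]
    set l := b.toList with hl
    have hcuts : (((PySem.List.enumerate l 0).filter (fun p => p.2 == '/')).map (·.1))
        = (cutsC l).map (fun n : Nat => (n : Int)) := by
      rw [cuts_eq l 0]
      simp
    have hflen : (pvSplitSlash b).length = (cutsC l).length + 1 := by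
      rw [pvSplitSlash_eq, List.length_map, (factsC l).1]
    rw [hcuts]
    simp only [List.length_map]
    by_cases hbig : (cutsC l).length > 4
    · rw [if_pos hbig, pvLoopA_overflow _ (by omega)]
    · rw [if_neg hbig, pvLoopA_inv _ _ (by omega) (by omega), hflen, pvSplitSlash_eq,
        pvPref_eq_cuts l]
      have hslots : ((cutsC l).map (fun n : Nat => (n : Int))).map
            (fun p => String.ofList (PySem.List.slice l none (some p)))
          = (cutsC l).map (fun p => String.ofList (l.take p)) := by
        rw [List.map_map]
        apply List.map_congr_left
        intro n _
        simp [PySem.List.slice_to_natCast]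
      have hofl : String.ofList l = b := by
        rw [hl]
        exact String.ofList_toList
      rw [hslots, hofl]
      simp [List.append_assoc]

-- folding A's loop equals B's map-filter
theorem pvFold_eq (dl : List (List String)) (acc : List (List String)) :
    dl.foldl (fun res line =>
        match pvLineA line with
        | some r => res ++ [r]
        | none => res) acc
      = acc ++ (dl.map pvRow).filterMap id := by
  induction dl generalizing acc with
  | nil => simp
  | cons line t ih =>
    simp only [List.foldl_cons, List.map_cons, List.filterMap_cons]
    rw [pvLine_eq]
    cases h : pvRow line with
    | none => simpa using ih acc
    | some r => rw [ih (acc ++ [r])]; simp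

-- ===== VERDICT (by name: the statement is the Claim_ definition above) =====
theorem tag_split_spec : Claim_equal_tag_split := by
  intro data_list _
  unfold Spec_tag_split tag_split tag_split_alt
  rw [pvFold_eq]
  simp
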